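-- pv_equiv track=rewrite | github.com/riadzoabi/Imposer | backend/imposition_engine.py | get_saddle_stitch_sheets
-- ===== SOURCE A (Python) =====
-- import math
--
-- def get_saddle_stitch_sheets(page_count: int) -> list[dict]:
--     """Get all saddle stitch sheet pairings."""
--     total = math.ceil(page_count / 4) * 4
--     sheets = []
--     for i in range(total // 4):
--         front_left = total - (2 * i) - 1
--         front_right = 2 * i
--         back_left = 2 * i + 1
--         back_right = total - (2 * i) - 2
--
--         sheets.append(
--             {
--                 "front": [
--                     front_left if front_left < page_count else None,
--                     front_right if front_right < page_count else None,
--                 ],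
--                 "back": [
--                     back_left if back_left < page_count else None,
--                     back_right if back_right < page_count else None,
--                 ],
--             }
--         )
--     return sheets
-- ===== SOURCE B (Python) =====
-- def _pairs(xs):
--     out = []
--     i = 0
--     while i + 1 < len(xs):
--         out.append((xs[i], xs[i + 1]))
--         i += 2
--     return out
--
--
-- def get_saddle_stitch_sheets(page_count: int) -> list[dict]:
--     """Get all saddle stitch sheet pairings (split halves, reverse the back, pair and zip)."""
--     total = -(-page_count // 4) * 4
--     pages = [i if i < page_count else None for i in range(total)]
--     half = total // 2
--     front = _pairs(pages[:half])
--     back = _pairs(pages[half:][::-1])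
--     return [{"front": [fl, fr], "back": [bl, br]}
--             for (fr, bl), (fl, br) in zip(front, back)]
-- ===== Notes on version B (the rewrite author's own statement) =====
-- stated objective: alternative
-- what changed: Replaces A's per-sheet index arithmetic (front/back positions computed from a counter i) by a structural pipeline over a padded page list: split it at the midpoint, reverse the back half, chunk both halves into consecutive pairs and zip them into sheets.
import Mathlib
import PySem

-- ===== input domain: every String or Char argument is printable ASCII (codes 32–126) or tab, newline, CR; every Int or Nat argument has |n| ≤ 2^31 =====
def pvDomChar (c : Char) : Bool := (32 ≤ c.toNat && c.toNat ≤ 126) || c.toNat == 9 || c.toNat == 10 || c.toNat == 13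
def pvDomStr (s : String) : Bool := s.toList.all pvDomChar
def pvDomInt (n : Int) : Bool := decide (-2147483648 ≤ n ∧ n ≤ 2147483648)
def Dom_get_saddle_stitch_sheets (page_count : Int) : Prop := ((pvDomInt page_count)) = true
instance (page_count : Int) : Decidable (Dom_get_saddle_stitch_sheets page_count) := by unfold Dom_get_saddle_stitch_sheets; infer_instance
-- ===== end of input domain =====

-- B replaces A's per-sheet index arithmetic by a structural pipeline — split the padded page
-- list into halves, reverse the back half, chunk both into pairs and zip — same cost, proved equal.


-- ===== PORT A =====
-- math.ceil(page_count / 4) is ported as integer ceiling division -((-page_count) // 4);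
-- exact on the domain (|page_count| ≤ 2^31, where the float division is exact).
def get_saddle_stitch_sheets (page_count : Int) : List (List (String × List (Option Int))) :=
  let total := -(PySem.Int.floordiv (-page_count) 4) * 4
  (PySem.List.pyRange 0 (PySem.Int.floordiv total 4) 1).foldl
    (fun sheets i =>
      let front_left := total - (2 * i) - 1
      let front_right := 2 * i
      let back_left := 2 * i + 1
      let back_right := total - (2 * i) - 2
      sheets ++
        [[("front", [if front_left < page_count then some front_left else none,
                     if front_right < page_count then some front_right else none]),
          ("back", [if back_left < page_count then some back_left else none,
                    if back_right < page_count then some back_right else none])]]) []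

-- ===== PORT B =====
-- _pairs: consecutive-pair chunking (Source B's index loop, as the obvious structural recursion)
def pvPairs {α : Type} : List α → List (α × α)
  | a :: b :: rest => (a, b) :: pvPairs rest
  | _ => []

def get_saddle_stitch_sheets_alt (page_count : Int) : List (List (String × List (Option Int))) :=
  let total := -(PySem.Int.floordiv (-page_count) 4) * 4
  let pages := (PySem.List.pyRange 0 total 1).map
    (fun i => if i < page_count then some i else none)
  let half := PySem.Int.floordiv total 2
  let front := pvPairs (PySem.List.slice pages none (some half))
  let back := pvPairs (PySem.List.slice pages (some half) none).reverse
  (front.zip back).map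
    (fun x => [("front", [x.2.1, x.1.1]), ("back", [x.1.2, x.2.2])])

-- ===== PRECONDITION & SPEC =====
def Spec_get_saddle_stitch_sheets (page_count : Int) (out : List (List (String × List (Option Int)))) : Prop := out = get_saddle_stitch_sheets_alt page_count
instance (page_count : Int) (out : List (List (String × List (Option Int)))) : Decidable (Spec_get_saddle_stitch_sheets page_count out) := by unfold Spec_get_saddle_stitch_sheets; infer_instance

-- ===== CLAIM (what is proved, stated in full; the proofs are below) =====
def Claim_equal_get_saddle_stitch_sheets : Prop := ∀ (page_count : Int), Dom_get_saddle_stitch_sheets page_count → Spec_get_saddle_stitch_sheets page_count (get_saddle_stitch_sheets page_count)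

-- ===== LEMMAS AND PROOFS =====

theorem pvPairs_map_range {α : Type} (f : Nat → α) (k : Nat) :
    pvPairs ((List.range (2 * k)).map f) =
      (List.range k).map (fun i => (f (2 * i), f (2 * i + 1))) := by
  induction k generalizing f with
  | zero => simp [pvPairs]
  | succ k ih =>
    have h2 : 2 * (k + 1) = (2 * k + 1) + 1 := by omega
    rw [h2, List.range_succ_eq_map, List.range_succ_eq_map, List.range_succ_eq_map]
    simp only [List.map_cons, List.map_map, pvPairs]
    congr 1
    have hf : f ∘ Nat.succ ∘ Nat.succ = fun n => f (n + 2) := by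
      funext n; rfl
    rw [hf, ih (fun n => f (n + 2))]
    apply List.map_congr_left
    intro i _
    simp only [Function.comp]
    refine Prod.ext ?_ ?_
    · show f (2 * i + 2) = f (2 * (i + 1))
      congr 1
    · show f (2 * i + 1 + 2) = f (2 * (i + 1) + 1)
      congr 1

theorem rev_map_range {α : Type} (f : Nat → α) (n : Nat) :
    ((List.range n).map f).reverse = (List.range n).map (fun i => f (n - 1 - i)) := by
  induction n with
  | zero => simp
  | succ n ih =>
    have L : (List.map f (List.range (n + 1))).reverse
        = f n :: (List.map f (List.range n)).reverse := by
      rw [List.range_succ]; simp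
    have R : List.map (fun i => f (n + 1 - 1 - i)) (List.range (n + 1))
        = f n :: List.map (fun i => f (n - 1 - i)) (List.range n) := by
      rw [List.range_succ_eq_map, List.map_cons, List.map_map]
      congr 1
      apply List.map_congr_left
      intro i _
      simp only [Function.comp]
      congr 1; omega
    rw [L, R, ih]

theorem get_saddle_stitch_sheets_spec : Claim_equal_get_saddle_stitch_sheets := by
  intro pc _
  show get_saddle_stitch_sheets pc = get_saddle_stitch_sheets_alt pc
  have hfd4 : ∀ a : Int, PySem.Int.floordiv a 4 = a / 4 :=
    fun a => PySem.Int.floordiv_eq_ediv_of_pos (by norm_num)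
  have hfd2 : ∀ a : Int, PySem.Int.floordiv a 2 = a / 2 :=
    fun a => PySem.Int.floordiv_eq_ediv_of_pos (by norm_num)
  simp only [get_saddle_stitch_sheets, get_saddle_stitch_sheets_alt, hfd4, hfd2]
  by_cases hle : pc ≤ 0
  · -- no pages: both ranges are empty
    have h1 : -(-pc / 4) * 4 / 4 ≤ 0 := by omega
    have h2 : -(-pc / 4) * 4 ≤ 0 := by omega
    rw [PySem.List.pyRange_one_eq_nil h1, PySem.List.pyRange_one_eq_nil h2]
    simp [pvPairs, PySem.List.slice]
  · have hpos : 0 < pc := by omega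
    obtain ⟨m, hm⟩ : ∃ m : Nat, -(-pc / 4) = (m : Int) := ⟨(-(-pc / 4)).toNat, by omega⟩
    rw [hm]
    -- A side
    have hA4 : (m : Int) * 4 / 4 = (m : Int) := by omega
    rw [hA4, PySem.List.pyRange_zero_nat m, PySem.List.foldl_append_singleton_eq_map,
      List.nil_append, List.map_map]
    -- B side
    have hB4 : (m : Int) * 4 = ((4 * m : Nat) : Int) := by push_cast; ring
    have hB2 : ((4 * m : Nat) : Int) / 2 = ((2 * m : Nat) : Int) := by omega
    rw [hB4, hB2, PySem.List.pyRange_zero_nat (4 * m), List.map_map,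
      PySem.List.slice_to _ (by positivity), PySem.List.slice_from _ (by positivity)]
    rw [Int.toNat_natCast]
    rw [show 4 * m = 2 * m + 2 * m from by omega, List.range_add]
    rw [List.map_append, List.take_left' (by simp), List.drop_left' (by simp)]
    rw [List.map_map, rev_map_range, pvPairs_map_range, pvPairs_map_range, List.zip_map',
      List.map_map]
    apply List.map_congr_left
    intro k hk
    rw [List.mem_range] at hk
    simp only [Function.comp]
    have e1 : ((2 * m + (2 * m - 1 - 2 * k) : Nat) : Int) = (m : Int) * 4 - 2 * (k : Int) - 1 := by
      omega
    have e2 : ((2 * m + (2 * m - 1 - (2 * k + 1)) : Nat) : Int) = (m : Int) * 4 - 2 * (k : Int) - 2 := by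
      omega
    have e3 : ((2 * k : Nat) : Int) = 2 * (k : Int) := by omega
    have e4 : ((2 * k + 1 : Nat) : Int) = 2 * (k : Int) + 1 := by omega
    rw [e1, e2, e3, e4]
    rw [show ((2 * m + 2 * m : Nat) : Int) = (m : Int) * 4 from by omega]
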